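-- pv_equiv track=rewrite | github.com/samir-sarwar/ArchFlow | backend/src/services/github_fetcher.py | _identify_priority_files
-- ===== SOURCE A (Python) =====
-- PRIORITY_FILES = [
--     "README.md",
--     "README.rst",
--     "README",
--     "package.json",
--     "requirements.txt",
--     "Pipfile",
--     "pyproject.toml",
--     "go.mod",
--     "Cargo.toml",
--     "pom.xml",
--     "build.gradle",
--     "Dockerfile",
--     "docker-compose.yml",
--     "docker-compose.yaml",
--     "serverless.yml",
--     "serverless.yaml",
--     "template.yaml",
--     "template.yml",
--     "cdk.json",
--     "tsconfig.json",
--     "next.config.js",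
--     "next.config.ts",
--     "vite.config.ts",
--     "vite.config.js",
--     "nuxt.config.ts",
--     "angular.json",
--     "architecture.md",
--     "ARCHITECTURE.md",
--     "docs/architecture.md",
--     "docs/ARCHITECTURE.md",
-- ]
--
-- PRIORITY_PREFIXES = [
--     ".github/workflows/",
--     "terraform/",
--     "infra/",
--     "infrastructure/",
--     "deploy/",
-- ]
--
-- def _identify_priority_files(tree_paths: list[str]) -> list[str]:
--     """Identify which files to fetch based on priority list and patterns."""
--     path_set = set(tree_paths)
--     to_fetch: list[str] = []
--     seen: set[str] = set()
--
--     # Exact matches first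
--     for pf in PRIORITY_FILES:
--         # Case-insensitive match
--         for actual in tree_paths:
--             if actual.lower() == pf.lower() and actual not in seen:
--                 to_fetch.append(actual)
--                 seen.add(actual)
--                 break
--
--     # Prefix pattern matches
--     for prefix in PRIORITY_PREFIXES:
--         for actual in tree_paths:
--             if actual.lower().startswith(prefix.lower()) and actual not in seen:
--                 # Only fetch files, not directories (files have extensions)
--                 if "." in actual.split("/")[-1]:
--                     to_fetch.append(actual)
--                     seen.add(actual)
--
--     # Cap to avoid too many API calls
--     return to_fetch[:15]
-- ===== SOURCE B (Python) =====
-- PRIORITY_FILES = [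
--     "README.md",
--     "README.rst",
--     "README",
--     "package.json",
--     "requirements.txt",
--     "Pipfile",
--     "pyproject.toml",
--     "go.mod",
--     "Cargo.toml",
--     "pom.xml",
--     "build.gradle",
--     "Dockerfile",
--     "docker-compose.yml",
--     "docker-compose.yaml",
--     "serverless.yml",
--     "serverless.yaml",
--     "template.yaml",
--     "template.yml",
--     "cdk.json",
--     "tsconfig.json",
--     "next.config.js",
--     "next.config.ts",
--     "vite.config.ts",
--     "vite.config.js",
--     "nuxt.config.ts",
--     "angular.json",
--     "architecture.md",
--     "ARCHITECTURE.md",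
--     "docs/architecture.md",
--     "docs/ARCHITECTURE.md",
-- ]
--
-- PRIORITY_PREFIXES = [
--     ".github/workflows/",
--     "terraform/",
--     "infra/",
--     "infrastructure/",
--     "deploy/",
-- ]
--
-- def _identify_priority_files(tree_paths: list[str]) -> list[str]:
--     """Identify which files to fetch based on priority list and patterns."""
--     # Path-major classification: a single pass over the (deduplicated) tree
--     # drops each path into the bucket of the first priority name or prefix it
--     # matches; the output is the buckets concatenated in priority order.
--     # Correct because a duplicate path can never be fetched twice, no priority
--     # NAME starts with a priority PREFIX, and a priority name's bucket is
--     # capped by how often that name occurs (case variants) in PRIORITY_FILES.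
--     key_mult: dict[str, int] = {}
--     for pf in PRIORITY_FILES:
--         k = pf.lower()
--         key_mult[k] = key_mult.get(k, 0) + 1
--
--     exact: dict[str, list[str]] = {k: [] for k in key_mult}
--     byprefix: dict[str, list[str]] = {prefix: [] for prefix in PRIORITY_PREFIXES}
--
--     for p in dict.fromkeys(tree_paths):  # each distinct path once, in order
--         low = p.lower()
--         if low in exact:
--             exact[low].append(p)
--         else:
--             for prefix in PRIORITY_PREFIXES:
--                 if low.startswith(prefix.lower()):
--                     if "." in p.split("/")[-1]:
--                         byprefix[prefix].append(p)
--                     break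
--
--     out: list[str] = []
--     for k, m in key_mult.items():
--         out += exact[k][:m]
--     for prefix in PRIORITY_PREFIXES:
--         out += byprefix[prefix]
--     return out[:15]
-- ===== Notes on version B (the rewrite author's own statement) =====
-- stated objective: faster
-- what changed: B replaces A's 35 staged scans of tree_paths (one per priority name and prefix, each with a seen-set) by a path-major single pass that classifies each distinct path into the bucket of the first priority name or prefix it matches, then concatenates the buckets in priority order with per-name multiplicity caps; no seen-set is needed.
import Mathlib
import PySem

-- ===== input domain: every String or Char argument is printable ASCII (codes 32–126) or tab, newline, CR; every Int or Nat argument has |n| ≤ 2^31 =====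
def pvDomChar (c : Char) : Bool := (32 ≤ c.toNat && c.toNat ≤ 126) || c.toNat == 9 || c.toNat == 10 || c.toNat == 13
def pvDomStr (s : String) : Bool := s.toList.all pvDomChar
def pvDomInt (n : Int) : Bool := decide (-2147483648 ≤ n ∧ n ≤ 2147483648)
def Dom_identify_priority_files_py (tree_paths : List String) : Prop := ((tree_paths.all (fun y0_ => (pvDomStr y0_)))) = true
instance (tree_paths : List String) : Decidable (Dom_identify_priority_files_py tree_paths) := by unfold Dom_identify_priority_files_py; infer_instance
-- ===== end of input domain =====

-- B replaces A's 35 staged scans of the tree (one per priority name/prefix, with a seen-set)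
-- by a single path-major classification pass into per-priority buckets (objective: faster
-- constant factor; equality of return values proved below).


-- Shared module constants of both Pythons
def pvPRIORITY_FILES : List String :=
  ["README.md", "README.rst", "README", "package.json", "requirements.txt", "Pipfile",
   "pyproject.toml", "go.mod", "Cargo.toml", "pom.xml", "build.gradle", "Dockerfile",
   "docker-compose.yml", "docker-compose.yaml", "serverless.yml", "serverless.yaml",
   "template.yaml", "template.yml", "cdk.json", "tsconfig.json", "next.config.js",
   "next.config.ts", "vite.config.ts", "vite.config.js", "nuxt.config.ts", "angular.json",
   "architecture.md", "ARCHITECTURE.md", "docs/architecture.md", "docs/ARCHITECTURE.md"]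

def pvPRIORITY_PREFIXES : List String :=
  [".github/workflows/", "terraform/", "infra/", "infrastructure/", "deploy/"]

-- '"." in actual.split("/")[-1]' (identical expression in both Pythons).
-- split? is some (sep "/" ≠ "") and its result is nonempty, so the getD defaults are never hit.
def pvHasDotBase (actual : String) : Bool :=
  PySem.Str.isIn "." ((PySem.List.pyGet? ((PySem.Str.split? actual "/").getD []) (-1)).getD "")

-- ===== PORT A =====
-- one step of A's exact-match loop: inner 'for actual in tree_paths: … break' is find?
def pvStepExactA (tree_paths : List String) (st : List String × PySem.Set String) (pf : String) :
    List String × PySem.Set String :=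
  match tree_paths.find? (fun actual =>
      (PySem.Str.lower actual == PySem.Str.lower pf) && !(PySem.Set.contains st.2 actual)) with
  | some actual => (st.1 ++ [actual], PySem.Set.add st.2 actual)
  | none => st

-- one step of A's prefix loop (inner loop over tree_paths, nested ifs as in the Python)
def pvStepPrefixA (tree_paths : List String) (st : List String × PySem.Set String) (pre : String) :
    List String × PySem.Set String :=
  tree_paths.foldl (fun st actual =>
    if PySem.Str.startswith (PySem.Str.lower actual) (PySem.Str.lower pre)
        && !(PySem.Set.contains st.2 actual) then
      if pvHasDotBase actual then (st.1 ++ [actual], PySem.Set.add st.2 actual) else st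
    else st) st

def identify_priority_files_py (tree_paths : List String) : List String :=
  let _path_set := PySem.Set.ofList tree_paths  -- computed and unused, as in the Python
  let st := pvPRIORITY_FILES.foldl (pvStepExactA tree_paths) ([], PySem.Set.empty)
  let st := pvPRIORITY_PREFIXES.foldl (pvStepPrefixA tree_paths) st
  PySem.List.slice st.1 none (some 15)

-- ===== PORT B =====
-- key_mult: how often each lowercased priority name occurs in PRIORITY_FILES
def pvKeyMultB : PySem.Dict String Int :=
  pvPRIORITY_FILES.foldl
    (fun d pf => d.insert (PySem.Str.lower pf) (d.getD (PySem.Str.lower pf) 0 + 1))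
    PySem.Dict.empty

-- exact = {k: [] for k in key_mult};  byprefix = {prefix: [] for prefix in PRIORITY_PREFIXES}
def pvExactInitB : PySem.Dict String (List String) :=
  pvKeyMultB.keys.foldl (fun d k => d.insert k []) PySem.Dict.empty

def pvByPrefixInitB : PySem.Dict String (List String) :=
  pvPRIORITY_PREFIXES.foldl (fun d pre => d.insert pre []) PySem.Dict.empty

-- the body of B's single classification loop ('for prefix …: if …: …; break' is find?)
def pvClassifyB (st : PySem.Dict String (List String) × PySem.Dict String (List String))
    (p : String) : PySem.Dict String (List String) × PySem.Dict String (List String) :=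
  let low := PySem.Str.lower p
  if st.1.contains low then
    (st.1.modify low [] (· ++ [p]), st.2)
  else
    match pvPRIORITY_PREFIXES.find? (fun prefix_ =>
        PySem.Str.startswith low (PySem.Str.lower prefix_)) with
    | some prefix_ =>
        if pvHasDotBase p then (st.1, st.2.modify prefix_ [] (· ++ [p])) else st
    | none => st

def identify_priority_files_py_alt (tree_paths : List String) : List String :=
  let st := (PySem.List.dedup tree_paths).foldl pvClassifyB (pvExactInitB, pvByPrefixInitB)
  let out := pvKeyMultB.items.foldl
    (fun out km => out ++ PySem.List.slice (st.1.getD km.1 []) none (some km.2)) []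
  let out := pvPRIORITY_PREFIXES.foldl (fun out prefix_ => out ++ st.2.getD prefix_ []) out
  PySem.List.slice out none (some 15)

-- ===== PRECONDITION & SPEC =====
def Spec_identify_priority_files_py (tree_paths : List String) (out : List String) : Prop := out = identify_priority_files_py_alt tree_paths
instance (tree_paths : List String) (out : List String) : Decidable (Spec_identify_priority_files_py tree_paths out) := by unfold Spec_identify_priority_files_py; infer_instance

-- ===== CLAIM (what is proved, stated in full; the proofs are below) =====
def Claim_equal_identify_priority_files_py : Prop := ∀ (tree_paths : List String), Dom_identify_priority_files_py tree_paths → Spec_identify_priority_files_py tree_paths (identify_priority_files_py tree_paths)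

-- ===== LEMMAS AND PROOFS =====

-- abbreviations used only by the proofs
def pvLow (s : String) : String := PySem.Str.lower s

-- the distinct lowercased priority names with their multiplicities, in order
def pvRunsLit : List (String × Nat) :=
  [("readme.md",1),("readme.rst",1),("readme",1),("package.json",1),("requirements.txt",1),
   ("pipfile",1),("pyproject.toml",1),("go.mod",1),("cargo.toml",1),("pom.xml",1),
   ("build.gradle",1),("dockerfile",1),("docker-compose.yml",1),("docker-compose.yaml",1),
   ("serverless.yml",1),("serverless.yaml",1),("template.yaml",1),("template.yml",1),
   ("cdk.json",1),("tsconfig.json",1),("next.config.js",1),("next.config.ts",1),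
   ("vite.config.ts",1),("vite.config.js",1),("nuxt.config.ts",1),("angular.json",1),
   ("architecture.md",2),("docs/architecture.md",2)]

def pvKeysLit : List String := pvRunsLit.map Prod.fst

-- the (dedup'd) tree paths whose lowercase is k, in order
def pvMk (P : List String) (k : String) : List String :=
  (PySem.List.dedup P).filter (fun a => pvLow a == k)

def pvSelE (P : List String) : List String :=
  pvRunsLit.flatMap (fun r => (pvMk P r.1).take r.2)

def pvCondPre (pl : String) (a : String) : Bool :=
  PySem.Str.startswith (pvLow a) pl && pvHasDotBase a

def pvBigPre (P : List String) : List String :=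
  pvPRIORITY_PREFIXES.flatMap (fun pre => (PySem.List.dedup P).filter (pvCondPre (pvLow pre)))

-- B's prefix-bucket membership predicate
def pvPB (q : String) (p : String) : Bool :=
  !(pvKeysLit.contains (pvLow p))
    && (pvPRIORITY_PREFIXES.find? (fun prefix_ =>
          PySem.Str.startswith (pvLow p) (PySem.Str.lower prefix_)) == some q)
    && pvHasDotBase p

-- A's steps with the priority name / prefix already lowercased (definitional repackagings)
def pvStepExactK (P : List String) (st : List String × PySem.Set String) (k : String) :
    List String × PySem.Set String :=
  match P.find? (fun actual =>
      (PySem.Str.lower actual == k) && !(PySem.Set.contains st.2 actual)) with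
  | some actual => (st.1 ++ [actual], PySem.Set.add st.2 actual)
  | none => st

def pvBodyP (pl : String) (st : List String × PySem.Set String) (actual : String) :
    List String × PySem.Set String :=
  if PySem.Str.startswith (PySem.Str.lower actual) pl && !(PySem.Set.contains st.2 actual) then
    if pvHasDotBase actual then (st.1 ++ [actual], PySem.Set.add st.2 actual) else st
  else st

def pvStepPrefixK (P : List String) (st : List String × PySem.Set String) (pl : String) :
    List String × PySem.Set String :=
  P.foldl (pvBodyP pl) st

-- ---------- generic contains / dedup lemmas (all at type String) ----------

theorem pv_lcontains (l : List String) (a : String) : l.contains a = decide (a ∈ l) := by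
  by_cases h : a ∈ l <;> simp [h]

theorem pv_contains_eq (s : PySem.Set String) (a : String) :
    PySem.Set.contains s a = decide (a ∈ s) := by
  by_cases hm : a ∈ s
  · simp [hm]
  · cases hc : PySem.Set.contains s a
    · simp [hm]
    · exact absurd ((PySem.Set.contains_iff s a).1 hc) hm

theorem pv_mem_of_contains {s : PySem.Set String} {a : String}
    (h : PySem.Set.contains s a = true) : a ∈ s :=
  (PySem.Set.contains_iff s a).1 h

theorem pv_not_mem_of_contains {s : PySem.Set String} {a : String}
    (h : PySem.Set.contains s a = false) : a ∉ s := by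
  intro hm
  rw [(PySem.Set.contains_iff s a).2 hm] at h
  simp at h

theorem pv_contains_add (s : PySem.Set String) (x y : String) :
    PySem.Set.contains (PySem.Set.add s x) y = (PySem.Set.contains s y || y == x) := by
  rw [pv_contains_eq, pv_contains_eq]
  by_cases h1 : y ∈ s <;> by_cases h2 : y = x <;>
    simp [PySem.Set.mem_add, h1, h2]

theorem pv_mem_update (s : PySem.Set String) (l : List String) (y : String) :
    y ∈ PySem.Set.update s l ↔ y ∈ s ∨ y ∈ l := by
  induction l generalizing s with
  | nil => simp [PySem.Set.update]
  | cons x l IH =>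
    show y ∈ PySem.Set.update (PySem.Set.add s x) l ↔ _
    rw [IH, PySem.Set.mem_add]
    simp only [List.mem_cons]
    tauto

theorem pv_contains_update (s : PySem.Set String) (l : List String) (y : String) :
    PySem.Set.contains (PySem.Set.update s l) y
      = (PySem.Set.contains s y || l.contains y) := by
  rw [pv_contains_eq, pv_contains_eq, pv_lcontains]
  by_cases h1 : y ∈ s <;> by_cases h2 : y ∈ l <;> simp [pv_mem_update, h1, h2]

theorem pv_update_append (S : PySem.Set String) (x y : List String) :
    PySem.Set.update S (x ++ y) = PySem.Set.update (PySem.Set.update S x) y := by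
  simp [PySem.Set.update, List.foldl_append]

theorem pv_foldl_add_eq (l : List String) : ∀ (s : PySem.Set String),
    List.foldl PySem.Set.add s l
      = s ++ (PySem.Set.ofList l).filter (fun a => !(PySem.Set.contains s a)) := by
  induction l with
  | nil => intro s; simp [PySem.Set.ofList, PySem.Set.empty]
  | cons x l IH =>
    intro s
    have hof : PySem.Set.ofList (x :: l)
        = [x] ++ (PySem.Set.ofList l).filter (fun a => !(PySem.Set.contains [x] a)) := by
      show List.foldl PySem.Set.add PySem.Set.empty (x :: l) = _
      rw [List.foldl_cons]
      have hadd0 : PySem.Set.add PySem.Set.empty x = [x] := by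
        simp [PySem.Set.add, PySem.Set.contains, PySem.Set.empty]
      rw [hadd0]
      exact IH [x]
    rw [List.foldl_cons, IH (PySem.Set.add s x), hof]
    have hx1 : ∀ a : String, PySem.Set.contains [x] a = (a == x) := by
      intro a
      rw [pv_contains_eq]
      by_cases h : a = x <;> simp [h]
    by_cases hx : PySem.Set.contains s x = true
    · have hxm : x ∈ s := pv_mem_of_contains hx
      have hadd : PySem.Set.add s x = s := by simp [PySem.Set.add, hxm]
      rw [hadd]
      simp only [List.filter_append, List.filter_filter]
      have h1 : List.filter (fun a => !PySem.Set.contains s a) [x] = [] := by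
        simp [hxm]
      rw [h1, List.nil_append]
      congr 1
      apply List.filter_congr
      intro a _
      by_cases hax : a = x
      · subst hax; simp [hxm]
      · simp [hax]
    · have hxf : PySem.Set.contains s x = false := by
        cases h : PySem.Set.contains s x
        · rfl
        · exact absurd h hx
      have hxm : x ∉ s := pv_not_mem_of_contains hxf
      have hadd : PySem.Set.add s x = s ++ [x] := by simp [PySem.Set.add, hxm]
      rw [hadd]
      simp only [List.filter_append, List.filter_filter, List.append_assoc]
      have h1 : List.filter (fun a => !PySem.Set.contains s a) [x] = [x] := by
        simp [hxm]
      rw [h1]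
      congr 2
      apply List.filter_congr
      intro a _
      by_cases hax : a = x
      · subst hax; simp [hxm]
      · simp [hax]

theorem pv_dedup_cons (x : String) (l : List String) :
    PySem.List.dedup (x :: l)
      = x :: (PySem.List.dedup l).filter (fun a => !(a == x)) := by
  have hx1 : ∀ a : String, PySem.Set.contains [x] a = (a == x) := by
    intro a
    rw [pv_contains_eq]
    by_cases h : a = x <;> simp [h]
  show PySem.Set.ofList (x :: l) = _
  show List.foldl PySem.Set.add PySem.Set.empty (x :: l) = _
  rw [List.foldl_cons]
  have hadd0 : PySem.Set.add PySem.Set.empty x = [x] := by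
    simp [PySem.Set.add, PySem.Set.contains, PySem.Set.empty]
  rw [hadd0, pv_foldl_add_eq]
  show x :: _ = _
  congr 1
  rw [PySem.List.dedup_eq_ofList]
  apply List.filter_congr
  intro a _
  rw [hx1]

theorem pv_find?_dedup (l : List String) : ∀ (p : String → Bool),
    (PySem.List.dedup l).find? p = l.find? p := by
  induction l with
  | nil => intro p; rfl
  | cons x l IH =>
    intro p
    rw [pv_dedup_cons]
    cases hp : p x
    · rw [List.find?_cons_of_neg (by simp [hp]), List.find?_cons_of_neg (by simp [hp])]
      rw [List.find?_filter, IH]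
      congr 1
      funext a
      by_cases hax : a = x
      · subst hax; simp [hp]
      · simp [hax]
    · rw [List.find?_cons_of_pos (by simp [hp]), List.find?_cons_of_pos (by simp [hp])]

theorem pv_nodup_dedup (l : List String) : (PySem.List.dedup l).Nodup := by
  rw [PySem.List.dedup_eq_ofList]; exact PySem.Set.nodup_ofList l

-- ---------- A's exact phase ----------

theorem pv_find_localize (P : List String) (k : String) (q : String → Bool) :
    P.find? (fun a => (PySem.Str.lower a == k) && q a) = (pvMk P k).find? q := by
  rw [pvMk, List.find?_filter, pv_find?_dedup]
  congr 1
  funext a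
  cases h1 : (pvLow a == k) <;> cases h2 : q a <;> simp_all [pvLow]

-- one exact step from a state whose seen-set avoids pvMk P k
theorem pv_run1 (P : List String) (k : String) (out : List String) (S : PySem.Set String)
    (hS : ∀ a ∈ pvMk P k, PySem.Set.contains S a = false) :
    pvStepExactK P (out, S) k
      = (out ++ (pvMk P k).take 1, PySem.Set.update S ((pvMk P k).take 1)) := by
  unfold pvStepExactK
  rw [pv_find_localize P k (fun a => !(PySem.Set.contains S a))]
  cases hM : pvMk P k with
  | nil => simp [PySem.Set.update]
  | cons h t =>
    have hh : PySem.Set.contains S h = false := hS h (by rw [hM]; exact List.mem_cons_self)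
    rw [List.find?_cons_of_pos (by rw [hh]; rfl)]
    simp [PySem.Set.update]

-- the second step for a duplicated (case-variant) priority name
theorem pv_run2 (P : List String) (k : String) (out : List String) (S : PySem.Set String)
    (hS : ∀ a ∈ pvMk P k, PySem.Set.contains S a = false) :
    pvStepExactK P (out ++ (pvMk P k).take 1, PySem.Set.update S ((pvMk P k).take 1)) k
      = (out ++ (pvMk P k).take 2, PySem.Set.update S ((pvMk P k).take 2)) := by
  have hnd : (pvMk P k).Nodup := List.Nodup.filter _ (pv_nodup_dedup P)
  unfold pvStepExactK
  rw [pv_find_localize P k _]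
  cases hM : pvMk P k with
  | nil => simp [PySem.Set.update]
  | cons h t =>
    have hh : PySem.Set.contains (PySem.Set.update S [h]) h = true := by
      rw [pv_contains_update]
      simp
    rw [List.take_succ_cons, List.take_zero]
    rw [List.find?_cons_of_neg (by rw [hh]; simp)]
    cases t with
    | nil => simp [PySem.Set.update]
    | cons h2 t2 =>
      have hne : h2 ≠ h := by
        rw [hM] at hnd
        intro he
        exact (List.nodup_cons.mp hnd).1 (he ▸ List.mem_cons_self)
      have hh2 : PySem.Set.contains (PySem.Set.update S [h]) h2 = false := by
        rw [pv_contains_update]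
        have hm2 : h2 ∉ S := pv_not_mem_of_contains
          (hS h2 (by rw [hM]; exact List.mem_cons_of_mem _ List.mem_cons_self))
        simp [hm2, hne]
      rw [List.find?_cons_of_pos (by rw [hh2]; rfl)]
      simp [PySem.Set.update, List.append_assoc]

-- the whole exact phase over a run list
theorem pv_exact_phase (P : List String) :
    ∀ (runs : List (String × Nat)) (out : List String) (S : PySem.Set String),
    (∀ r ∈ runs, r.2 = 1 ∨ r.2 = 2) →
    (runs.map Prod.fst).Nodup →
    (∀ a, PySem.Set.contains S a = true → ∀ r ∈ runs, pvLow a ≠ r.1) →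
    List.foldl (pvStepExactK P) (out, S) (runs.flatMap (fun r => List.replicate r.2 r.1))
      = (out ++ runs.flatMap (fun r => (pvMk P r.1).take r.2),
         PySem.Set.update S (runs.flatMap (fun r => (pvMk P r.1).take r.2))) := by
  intro runs
  induction runs with
  | nil => intro out S _ _ _; simp [PySem.Set.update]
  | cons r rest IH =>
    intro out S hm hnd hD
    have hS1 : ∀ a ∈ pvMk P r.1, PySem.Set.contains S a = false := by
      intro a ha
      cases hc : PySem.Set.contains S a
      · rfl
      · exfalso
        have hlow : pvLow a = r.1 := by
          have := (List.mem_filter.mp ha).2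
          simpa [pvLow] using this
        exact hD a hc r List.mem_cons_self hlow
    have hstep : List.foldl (pvStepExactK P) (out, S) (List.replicate r.2 r.1)
        = (out ++ (pvMk P r.1).take r.2, PySem.Set.update S ((pvMk P r.1).take r.2)) := by
      rcases hm r List.mem_cons_self with h1 | h2
      · rw [h1]
        simp only [List.replicate_succ, List.replicate_zero, List.foldl_cons, List.foldl_nil]
        exact pv_run1 P r.1 out S hS1
      · rw [h2]
        simp only [List.replicate_succ, List.replicate_zero, List.foldl_cons, List.foldl_nil]
        rw [pv_run1 P r.1 out S hS1]
        exact pv_run2 P r.1 out S hS1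
    have hD' : ∀ a, PySem.Set.contains (PySem.Set.update S ((pvMk P r.1).take r.2)) a = true →
        ∀ r' ∈ rest, pvLow a ≠ r'.1 := by
      intro a hc r' hr'
      rw [pv_contains_update] at hc
      cases hsc : PySem.Set.contains S a
      · have htk : ((pvMk P r.1).take r.2).contains a = true := by
          cases htc : ((pvMk P r.1).take r.2).contains a
          · rw [hsc, htc] at hc; simp at hc
          · rfl
        have hmem : a ∈ (pvMk P r.1).take r.2 := by
          rw [pv_lcontains] at htk
          exact of_decide_eq_true htk
        have hlow : pvLow a = r.1 := by
          have := (List.mem_filter.mp (List.mem_of_mem_take hmem)).2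
          simpa [pvLow] using this
        have hne : r.1 ≠ r'.1 := by
          rw [List.map_cons] at hnd
          intro he
          exact (List.nodup_cons.mp hnd).1 (he ▸ List.mem_map_of_mem hr')
        rw [hlow]; exact hne
      · exact hD a hsc r' (List.mem_cons_of_mem _ hr')
    rw [List.flatMap_cons, List.foldl_append, hstep]
    rw [IH _ _ (fun r' h => hm r' (List.mem_cons_of_mem _ h))
        (by rw [List.map_cons] at hnd; exact (List.nodup_cons.mp hnd).2) hD']
    rw [List.flatMap_cons, List.append_assoc, pv_update_append]

-- ---------- A's prefix phase ----------

-- result of scanning l for condition `cond`, skipping elements already in S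
def pvFsel (cond : String → Bool) : List String → PySem.Set String → List String
  | [], _ => []
  | a :: l, S =>
    if cond a && !(PySem.Set.contains S a) then a :: pvFsel cond l (PySem.Set.add S a)
    else pvFsel cond l S

theorem pv_inner_fold (pl : String) :
    ∀ (l : List String) (out : List String) (S : PySem.Set String),
    pvStepPrefixK l (out, S) pl
      = (out ++ pvFsel (pvCondPre pl) l S,
         PySem.Set.update S (pvFsel (pvCondPre pl) l S)) := by
  intro l
  induction l with
  | nil => intro out S; simp [pvStepPrefixK, pvFsel, PySem.Set.update]
  | cons a l IH =>
    intro out S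
    show List.foldl (pvBodyP pl) (pvBodyP pl (out, S) a) l = _
    by_cases hc : PySem.Set.contains S a = true
    · have hmem : a ∈ S := pv_mem_of_contains hc
      have hb : pvBodyP pl (out, S) a = (out, S) := by
        simp [pvBodyP, hmem]
      have hf : pvFsel (pvCondPre pl) (a :: l) S = pvFsel (pvCondPre pl) l S := by
        simp [pvFsel, hmem]
      rw [hb, hf]; exact IH out S
    · have hcf : PySem.Set.contains S a = false := by
        cases h : PySem.Set.contains S a
        · rfl
        · exact absurd h hc
      have hnm : a ∉ S := pv_not_mem_of_contains hcf
      by_cases hsw : PySem.Str.startswith (PySem.Str.lower a) pl = true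
      · have hswN := hsw
        simp only [PySem.Str.startswith_eq, PySem.Str.toList_lower] at hswN
        by_cases hd : pvHasDotBase a = true
        · have hb : pvBodyP pl (out, S) a = (out ++ [a], PySem.Set.add S a) := by
            simp [pvBodyP, hswN, hnm, hd]
          have hf : pvFsel (pvCondPre pl) (a :: l) S
              = a :: pvFsel (pvCondPre pl) l (PySem.Set.add S a) := by
            simp [pvFsel, pvCondPre, pvLow, hswN, hnm, hd]
          rw [hb, hf]
          exact (IH (out ++ [a]) (PySem.Set.add S a)).trans (by simp [PySem.Set.update])
        · have hdf : pvHasDotBase a = false := by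
            cases h : pvHasDotBase a
            · rfl
            · exact absurd h hd
          have hb : pvBodyP pl (out, S) a = (out, S) := by
            simp [pvBodyP, hdf]
          have hf : pvFsel (pvCondPre pl) (a :: l) S = pvFsel (pvCondPre pl) l S := by
            simp [pvFsel, pvCondPre, pvLow, hdf]
          rw [hb, hf]; exact IH out S
      · have hswf : PySem.Str.startswith (PySem.Str.lower a) pl = false := by
          cases h : PySem.Str.startswith (PySem.Str.lower a) pl
          · rfl
          · exact absurd h hsw
        have hswN := hswf
        simp only [PySem.Str.startswith_eq, PySem.Str.toList_lower] at hswN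
        have hb : pvBodyP pl (out, S) a = (out, S) := by
          simp [pvBodyP, hswN]
        have hf : pvFsel (pvCondPre pl) (a :: l) S = pvFsel (pvCondPre pl) l S := by
          simp [pvFsel, pvCondPre, pvLow, hswN]
        rw [hb, hf]; exact IH out S

theorem pv_Fsel_filter (cond : String → Bool) :
    ∀ (l : List String) (S : PySem.Set String),
    pvFsel cond l S
      = (PySem.List.dedup l).filter (fun a => cond a && !(PySem.Set.contains S a)) := by
  intro l
  induction l with
  | nil => intro S; rfl
  | cons a l IH =>
    intro S
    rw [pv_dedup_cons, List.filter_cons]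
    by_cases hca : cond a = true
    · by_cases hsa : PySem.Set.contains S a = true
      · have hmem : a ∈ S := pv_mem_of_contains hsa
        have hfa : pvFsel cond (a :: l) S = pvFsel cond l S := by
          simp [pvFsel, hmem]
        have hpa : (cond a && !PySem.Set.contains S a) = false := by simp [hmem]
        rw [hfa, IH S, hpa]
        simp only [Bool.false_eq_true, if_false, List.filter_filter]
        apply List.filter_congr
        intro b _
        by_cases hba : b = a
        · subst hba; simp [hmem]
        · simp [hba]
      · have hsaf : PySem.Set.contains S a = false := by
          cases h : PySem.Set.contains S a
          · rfl
          · exact absurd h hsa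
        have hnm : a ∉ S := pv_not_mem_of_contains hsaf
        have hfa : pvFsel cond (a :: l) S = a :: pvFsel cond l (PySem.Set.add S a) := by
          simp [pvFsel, hca, hnm]
        have hpa : (cond a && !PySem.Set.contains S a) = true := by simp [hca, hnm]
        rw [hfa, IH (PySem.Set.add S a), hpa]
        simp only [if_true, List.filter_filter]
        congr 1
        apply List.filter_congr
        intro b _
        rw [pv_contains_add]
        cases h1 : cond b <;> cases h2 : PySem.Set.contains S b <;> cases h3 : (b == a) <;> rfl
    · have hcaf : cond a = false := by
        cases h : cond a
        · rfl
        · exact absurd h hca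
      have hfa : pvFsel cond (a :: l) S = pvFsel cond l S := by
        simp [pvFsel, hcaf]
      have hpa : (cond a && !PySem.Set.contains S a) = false := by simp [hcaf]
      rw [hfa, IH S, hpa]
      simp only [Bool.false_eq_true, if_false, List.filter_filter]
      apply List.filter_congr
      intro b _
      by_cases hba : b = a
      · subst hba; simp [hcaf]
      · simp [hba]

theorem pv_prefix_phase (P : List String) :
    ∀ (pres : List String) (out : List String) (S : PySem.Set String),
    (∀ a, PySem.Set.contains S a = true →
      ∀ pl ∈ pres, PySem.Str.startswith (pvLow a) pl = false) →
    pres.Pairwise (fun p q => ¬(p.toList <+: q.toList) ∧ ¬(q.toList <+: p.toList)) →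
    List.foldl (pvStepPrefixK P) (out, S) pres
      = (out ++ pres.flatMap (fun pl => (PySem.List.dedup P).filter (pvCondPre pl)),
         PySem.Set.update S
           (pres.flatMap (fun pl => (PySem.List.dedup P).filter (pvCondPre pl)))) := by
  intro pres
  induction pres with
  | nil => intro out S _ _; simp [PySem.Set.update]
  | cons pl rest IH =>
    intro out S H1 H2
    rw [List.foldl_cons, pv_inner_fold pl P out S, pv_Fsel_filter]
    have hF : (PySem.List.dedup P).filter
          (fun a => pvCondPre pl a && !(PySem.Set.contains S a))
        = (PySem.List.dedup P).filter (pvCondPre pl) := by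
      apply List.filter_congr
      intro a _
      cases hc : PySem.Set.contains S a
      · simp
      · have hns := H1 a hc pl List.mem_cons_self
        simp only [PySem.Str.startswith_eq, PySem.Str.toList_lower, pvLow] at hns
        simp [pvCondPre, pvLow, hns]
    rw [hF]
    obtain ⟨H2h, H2t⟩ := List.pairwise_cons.mp H2
    have H1' : ∀ a, PySem.Set.contains
          (PySem.Set.update S ((PySem.List.dedup P).filter (pvCondPre pl))) a = true →
        ∀ pl' ∈ rest, PySem.Str.startswith (pvLow a) pl' = false := by
      intro a hc pl' hpl'
      rw [pv_contains_update] at hc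
      cases hsc : PySem.Set.contains S a
      · have hbc : ((PySem.List.dedup P).filter (pvCondPre pl)).contains a = true := by
          cases h : ((PySem.List.dedup P).filter (pvCondPre pl)).contains a
          · rw [hsc, h] at hc; simp at hc
          · rfl
        have hmem : a ∈ (PySem.List.dedup P).filter (pvCondPre pl) := by
          rw [pv_lcontains] at hbc
          exact of_decide_eq_true hbc
        have hcond := (List.mem_filter.mp hmem).2
        have hswa : PySem.Str.startswith (pvLow a) pl = true := by
          cases hx : PySem.Str.startswith (pvLow a) pl
          · exfalso
            unfold pvCondPre at hcond
            rw [hx] at hcond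
            simp at hcond
          · rfl
        cases hsw' : PySem.Str.startswith (pvLow a) pl'
        · rfl
        · exfalso
          have hp1 : pl.toList <+: (pvLow a).toList := by
            rw [PySem.Str.startswith_eq] at hswa
            exact (PySem.Chars.startswith_iff _ _).mp hswa
          have hp2 : pl'.toList <+: (pvLow a).toList := by
            rw [PySem.Str.startswith_eq] at hsw'
            exact (PySem.Chars.startswith_iff _ _).mp hsw'
          rcases List.prefix_or_prefix_of_prefix hp1 hp2 with h | h
          · exact (H2h pl' hpl').1 h
          · exact (H2h pl' hpl').2 h
      · exact H1 a hsc pl' (List.mem_cons_of_mem _ hpl')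
    rw [IH _ _ H1' H2t]
    rw [List.flatMap_cons, List.append_assoc, pv_update_append]

-- ---------- decide facts about the literal constants ----------

theorem pv_F1 : ∀ k ∈ pvKeysLit, ∀ pre ∈ pvPRIORITY_PREFIXES,
    PySem.Str.startswith k (pvLow pre) = false := by decide

theorem pv_F2 : ∀ p ∈ pvPRIORITY_PREFIXES, ∀ q ∈ pvPRIORITY_PREFIXES,
    (pvLow p).toList <+: (pvLow q).toList → p = q := by decide

theorem pv_F4 : (pvPRIORITY_PREFIXES.map pvLow).Pairwise
    (fun p q => ¬(p.toList <+: q.toList) ∧ ¬(q.toList <+: p.toList)) := by decide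

theorem pv_F5 : pvPRIORITY_FILES.map pvLow
    = pvRunsLit.flatMap (fun r => List.replicate r.2 r.1) := by decide

theorem pv_F6 : ∀ r ∈ pvRunsLit, pvKeysLit.contains r.1 = true := by decide

set_option maxRecDepth 8192 in
theorem pv_F7 : ∀ r ∈ pvRunsLit, pvExactInitB.getD r.1 [] = [] := by decide

theorem pv_F8 : ∀ pre ∈ pvPRIORITY_PREFIXES, pvByPrefixInitB.getD pre [] = [] := by decide

theorem pv_F9 : ∀ r ∈ pvRunsLit, r.2 = 1 ∨ r.2 = 2 := by decide

theorem pv_F10 : (pvRunsLit.map Prod.fst).Nodup := by decide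

set_option maxRecDepth 8192 in
theorem pv_F11 : pvKeyMultB.items = pvRunsLit.map (fun r => (r.1, (r.2 : Int))) := by decide

set_option maxRecDepth 8192 in
theorem pv_F12 : pvExactInitB.items = pvKeysLit.map (fun k => (k, ([] : List String))) := by
  decide

-- ---------- B's side ----------

theorem pv_initE_contains : ∀ s, pvExactInitB.contains s = pvKeysLit.contains s := by
  intro s
  show pvExactInitB.items.any (fun p => p.1 == s) = _
  rw [pv_F12, List.any_map]
  rw [pv_lcontains]
  by_cases h : s ∈ pvKeysLit
  · simp only [h, decide_true]
    rw [List.any_eq_true]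
    exact ⟨s, h, by simp⟩
  · simp only [h, decide_false]
    rw [List.any_eq_false]
    intro x hx
    simp only [Function.comp]
    intro he
    exact h ((eq_of_beq he) ▸ hx)

theorem pv_classify_char (l : List String) :
    ∀ (d b : PySem.Dict String (List String)),
    (∀ s, d.contains s = pvKeysLit.contains s) →
    (∀ s, (l.foldl pvClassifyB (d, b)).1.contains s = pvKeysLit.contains s)
    ∧ (∀ k, pvKeysLit.contains k = true →
        (l.foldl pvClassifyB (d, b)).1.getD k []
          = d.getD k [] ++ l.filter (fun p => pvLow p == k))
    ∧ (∀ q, (l.foldl pvClassifyB (d, b)).2.getD q []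
          = b.getD q [] ++ l.filter (pvPB q)) := by
  induction l with
  | nil => intro d b hk; exact ⟨hk, fun k _ => by simp, fun q => by simp⟩
  | cons p l IH =>
    intro d b hk
    rw [List.foldl_cons]
    by_cases hcm : pvKeysLit.contains (PySem.Str.lower p) = true
    · have hmemt : PySem.Str.lower p ∈ pvKeysLit := by
        rw [pv_lcontains] at hcm
        exact of_decide_eq_true hcm
      have hstep : pvClassifyB (d, b) p = (d.modify (PySem.Str.lower p) [] (· ++ [p]), b) := by
        simp [pvClassifyB, hk, hmemt]
      rw [hstep]
      have hk' : ∀ s, (d.modify (PySem.Str.lower p) [] (· ++ [p])).contains s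
          = pvKeysLit.contains s := by
        intro s
        rw [PySem.Dict.contains_modify]
        by_cases hs : s = PySem.Str.lower p
        · subst hs; simp [hmemt]
        · have hbe : (s == PySem.Str.lower p) = false := by simp [hs]
          simp [hbe, hk s]
      obtain ⟨g1, g2, g3⟩ := IH (d.modify (PySem.Str.lower p) [] (· ++ [p])) b hk'
      refine ⟨g1, ?_, ?_⟩
      · intro k hkk
        rw [g2 k hkk, PySem.Dict.getD_modify, List.filter_cons]
        by_cases hkp : k = PySem.Str.lower p
        · have hbe : (pvLow p == k) = true := by rw [hkp]; simp [pvLow]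
          rw [if_pos hkp, if_pos hbe, hkp]
          simp [List.append_assoc]
        · have hbe : (pvLow p == k) = false := by
            cases hx : (pvLow p == k)
            · rfl
            · exact absurd (eq_of_beq hx).symm hkp
          rw [if_neg hkp, if_neg (by simp [hbe])]
      · intro q
        rw [g3 q, List.filter_cons]
        have hpb : pvPB q p = false := by simp [pvPB, pvLow, hmemt]
        simp [hpb]
    · have hcmf : pvKeysLit.contains (PySem.Str.lower p) = false := by
        cases h : pvKeysLit.contains (PySem.Str.lower p)
        · rfl
        · exact absurd h hcm
      have hmemf : PySem.Str.lower p ∉ pvKeysLit := by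
        intro hmem
        rw [pv_lcontains] at hcmf
        exact (of_decide_eq_false hcmf) hmem
      have hpk : ∀ k, pvKeysLit.contains k = true → (pvLow p == k) = false := by
        intro k hkk
        cases hbe : (pvLow p == k)
        · rfl
        · exfalso
          have he : pvLow p = k := eq_of_beq hbe
          apply hmemf
          rw [pv_lcontains] at hkk
          have : k ∈ pvKeysLit := of_decide_eq_true hkk
          rw [← he] at this
          exact this
      cases hfind : pvPRIORITY_PREFIXES.find? (fun prefix_ =>
          PySem.Str.startswith (PySem.Str.lower p) (PySem.Str.lower prefix_)) with
      | none =>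
        have hfindN := hfind
        simp only [PySem.Str.startswith_eq, PySem.Str.toList_lower] at hfindN
        have hstep : pvClassifyB (d, b) p = (d, b) := by
          simp [pvClassifyB, hk, hmemf, hfindN]
        rw [hstep]
        obtain ⟨g1, g2, g3⟩ := IH d b hk
        refine ⟨g1, ?_, ?_⟩
        · intro k hkk
          rw [g2 k hkk, List.filter_cons]
          simp [hpk k hkk]
        · intro q
          rw [g3 q, List.filter_cons]
          have hpb : pvPB q p = false := by simp [pvPB, pvLow, hfindN]
          simp [hpb]
      | some pre =>
        have hfindN := hfind
        simp only [PySem.Str.startswith_eq, PySem.Str.toList_lower] at hfindN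
        by_cases hd : pvHasDotBase p = true
        · have hstep : pvClassifyB (d, b) p = (d, b.modify pre [] (· ++ [p])) := by
            simp [pvClassifyB, hk, hmemf, hfindN, hd]
          rw [hstep]
          obtain ⟨g1, g2, g3⟩ := IH d (b.modify pre [] (· ++ [p])) hk
          refine ⟨g1, ?_, ?_⟩
          · intro k hkk
            rw [g2 k hkk, List.filter_cons]
            simp [hpk k hkk]
          · intro q
            rw [g3 q, PySem.Dict.getD_modify, List.filter_cons]
            by_cases hq : q = pre
            · subst hq
              have hpb : pvPB q p = true := by
                simp [pvPB, pvLow, hmemf, hfindN, hd]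
              simp only [hpb, if_true, List.append_assoc, List.singleton_append]
            · have hqne : (pre == q) = false := by
                cases hbe : (pre == q)
                · rfl
                · exact absurd (eq_of_beq hbe).symm hq
              have hpb : pvPB q p = false := by
                simp [pvPB, pvLow, hfindN, hqne]
              simp only [hpb, Bool.false_eq_true, if_false, if_neg hq]
        · have hdf : pvHasDotBase p = false := by
            cases h : pvHasDotBase p
            · rfl
            · exact absurd h hd
          have hstep : pvClassifyB (d, b) p = (d, b) := by
            simp [pvClassifyB, hk, hmemf, hfindN, hdf]
          rw [hstep]
          obtain ⟨g1, g2, g3⟩ := IH d b hk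
          refine ⟨g1, ?_, ?_⟩
          · intro k hkk
            rw [g2 k hkk, List.filter_cons]
            simp [hpk k hkk]
          · intro q
            rw [g3 q, List.filter_cons]
            have hpb : pvPB q p = false := by simp [pvPB, hdf]
            simp [hpb]

theorem pv_selE_low (P : List String) : ∀ a ∈ pvSelE P, pvLow a ∈ pvKeysLit := by
  intro a ha
  obtain ⟨r, hr, hmem⟩ := List.mem_flatMap.mp ha
  have hlow : pvLow a = r.1 := by
    have := (List.mem_filter.mp (List.mem_of_mem_take hmem)).2
    simpa [pvLow] using this
  rw [hlow]
  exact List.mem_map_of_mem hr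

theorem pv_bucket_eq : ∀ pre ∈ pvPRIORITY_PREFIXES, ∀ a : String,
    pvCondPre (pvLow pre) a = pvPB pre a := by
  intro pre hpre a
  unfold pvCondPre pvPB
  cases hfind : pvPRIORITY_PREFIXES.find? (fun prefix_ =>
      PySem.Str.startswith (pvLow a) (PySem.Str.lower prefix_)) with
  | none =>
    have hsw : PySem.Str.startswith (pvLow a) (pvLow pre) = false := by
      cases h : PySem.Str.startswith (pvLow a) (pvLow pre)
      · rfl
      · exact absurd h (List.find?_eq_none.mp hfind pre hpre)
    rw [hsw]
    simp
  | some pre'' =>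
    have hp''0 := List.find?_some hfind
    have hp'' : PySem.Str.startswith (pvLow a) (PySem.Str.lower pre'') = true := hp''0
    have hm'' : pre'' ∈ pvPRIORITY_PREFIXES := List.mem_of_find?_eq_some hfind
    by_cases hsw : PySem.Str.startswith (pvLow a) (pvLow pre) = true
    · have heq : pre'' = pre := by
        have h1 : (pvLow pre'').toList <+: (pvLow a).toList := by
          have h := hp''
          rw [PySem.Str.startswith_eq] at h
          exact (PySem.Chars.startswith_iff _ _).mp h
        have h2 : (pvLow pre).toList <+: (pvLow a).toList := by
          have h := hsw
          rw [PySem.Str.startswith_eq] at h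
          exact (PySem.Chars.startswith_iff _ _).mp h
        rcases List.prefix_or_prefix_of_prefix h1 h2 with h | h
        · exact pv_F2 pre'' hm'' pre hpre h
        · exact (pv_F2 pre hpre pre'' hm'' h).symm
      subst heq
      have hkm : pvKeysLit.contains (pvLow a) = false := by
        cases hkc : pvKeysLit.contains (pvLow a)
        · rfl
        · exfalso
          have hmem : pvLow a ∈ pvKeysLit := by
            rw [pv_lcontains] at hkc
            exact of_decide_eq_true hkc
          have hf := pv_F1 (pvLow a) hmem pre'' hpre
          rw [hf] at hsw
          exact Bool.false_ne_true hsw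
      rw [hsw, hkm]
      simp
    · have hswf : PySem.Str.startswith (pvLow a) (pvLow pre) = false := by
        cases h : PySem.Str.startswith (pvLow a) (pvLow pre)
        · rfl
        · exact absurd h hsw
      have hne : (pre'' == pre) = false := by
        cases hbe : (pre'' == pre)
        · rfl
        · exfalso
          have he : pre'' = pre := eq_of_beq hbe
          rw [he] at hp''
          rw [show PySem.Str.startswith (pvLow a) (PySem.Str.lower pre)
              = PySem.Str.startswith (pvLow a) (pvLow pre) from rfl, hswf] at hp''
          exact Bool.false_ne_true hp''
      rw [hswf]
      simp [hne]

-- ---------- assembling both programs ----------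

theorem pv_A_eq (P : List String) :
    identify_priority_files_py P
      = PySem.List.slice (pvSelE P ++ pvBigPre P) none (some 15) := by
  rw [show identify_priority_files_py P
      = PySem.List.slice
          (List.foldl (pvStepPrefixA P)
            (List.foldl (pvStepExactA P) ([], PySem.Set.empty) pvPRIORITY_FILES)
            pvPRIORITY_PREFIXES).1 none (some 15) from rfl]
  have hE : List.foldl (pvStepExactA P) ([], PySem.Set.empty) pvPRIORITY_FILES
      = (pvSelE P, PySem.Set.update PySem.Set.empty (pvSelE P)) := by
    have h1 : List.foldl (pvStepExactA P) ([], PySem.Set.empty) pvPRIORITY_FILES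
        = List.foldl (pvStepExactK P) ([], PySem.Set.empty) (pvPRIORITY_FILES.map pvLow) := by
      rw [List.foldl_map]
      rfl
    rw [h1, pv_F5,
      pv_exact_phase P pvRunsLit [] PySem.Set.empty pv_F9 pv_F10
        (by intro a hc r hr; simp [PySem.Set.contains, PySem.Set.empty] at hc)]
    simp [pvSelE]
  rw [hE]
  have h2 : List.foldl (pvStepPrefixA P)
        (pvSelE P, PySem.Set.update PySem.Set.empty (pvSelE P)) pvPRIORITY_PREFIXES
      = List.foldl (pvStepPrefixK P)
        (pvSelE P, PySem.Set.update PySem.Set.empty (pvSelE P))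
        (pvPRIORITY_PREFIXES.map pvLow) := by
    rw [List.foldl_map]
    rfl
  rw [h2,
    pv_prefix_phase P (pvPRIORITY_PREFIXES.map pvLow) (pvSelE P)
      (PySem.Set.update PySem.Set.empty (pvSelE P))
      (by
        intro a hc pl hpl
        rw [pv_contains_update] at hc
        have hce : PySem.Set.contains PySem.Set.empty a = false := by
          simp [PySem.Set.contains, PySem.Set.empty]
        rw [hce] at hc
        have hmem : a ∈ pvSelE P := by
          rw [pv_lcontains] at hc
          simpa using of_decide_eq_true (by simpa using hc)
        obtain ⟨pre, hpre, rfl⟩ := List.mem_map.mp hpl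
        exact pv_F1 (pvLow a) (pv_selE_low P a hmem) pre hpre)
      pv_F4]
  show PySem.List.slice
      (pvSelE P ++ (pvPRIORITY_PREFIXES.map pvLow).flatMap
        (fun pl => (PySem.List.dedup P).filter (pvCondPre pl))) none (some 15) = _
  rw [List.flatMap_map]
  rfl

theorem pv_B_eq (P : List String) :
    identify_priority_files_py_alt P
      = PySem.List.slice (pvSelE P ++ pvBigPre P) none (some 15) := by
  rw [show identify_priority_files_py_alt P
      = PySem.List.slice
          (List.foldl
            (fun out prefix_ => out ++
              ((PySem.List.dedup P).foldl pvClassifyB (pvExactInitB, pvByPrefixInitB)).2.getD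
                prefix_ [])
            (List.foldl
              (fun out km => out ++
                PySem.List.slice
                  (((PySem.List.dedup P).foldl pvClassifyB
                      (pvExactInitB, pvByPrefixInitB)).1.getD km.1 [])
                  none (some km.2))
              [] pvKeyMultB.items)
            pvPRIORITY_PREFIXES) none (some 15) from rfl]
  obtain ⟨g1, g2, g3⟩ :=
    pv_classify_char (PySem.List.dedup P) pvExactInitB pvByPrefixInitB pv_initE_contains
  have hEout : List.foldl
      (fun out km => out ++
        PySem.List.slice
          (((PySem.List.dedup P).foldl pvClassifyB (pvExactInitB, pvByPrefixInitB)).1.getD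
            km.1 [])
          none (some km.2))
      [] pvKeyMultB.items = pvSelE P := by
    rw [pv_F11, List.foldl_map]
    have hcg : List.foldl
        (fun (out : List String) (r : String × Nat) => out ++
          PySem.List.slice
            (((PySem.List.dedup P).foldl pvClassifyB (pvExactInitB, pvByPrefixInitB)).1.getD
              r.1 [])
            none (some (r.2 : Int)))
        [] pvRunsLit
        = List.foldl (fun out r => out ++ (pvMk P r.1).take r.2) [] pvRunsLit := by
      apply PySem.List.foldl_congr_mem
      intro acc r hr
      have hgd : ((PySem.List.dedup P).foldl pvClassifyB
          (pvExactInitB, pvByPrefixInitB)).1.getD r.1 [] = pvMk P r.1 := by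
        rw [g2 r.1 (pv_F6 r hr), pv_F7 r hr, List.nil_append]
        rfl
      rw [hgd, PySem.List.slice_to _ (Int.natCast_nonneg r.2)]
      simp
    rw [hcg, PySem.List.foldl_append_eq_flatMap]
    simp [pvSelE]
  rw [hEout]
  have hPout : List.foldl
      (fun out prefix_ => out ++
        ((PySem.List.dedup P).foldl pvClassifyB (pvExactInitB, pvByPrefixInitB)).2.getD
          prefix_ [])
      (pvSelE P) pvPRIORITY_PREFIXES = pvSelE P ++ pvBigPre P := by
    have hcg : List.foldl
        (fun (out : List String) prefix_ => out ++
          ((PySem.List.dedup P).foldl pvClassifyB (pvExactInitB, pvByPrefixInitB)).2.getD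
            prefix_ [])
        (pvSelE P) pvPRIORITY_PREFIXES
        = List.foldl
          (fun out pre => out ++ (PySem.List.dedup P).filter (pvCondPre (pvLow pre)))
          (pvSelE P) pvPRIORITY_PREFIXES := by
      apply PySem.List.foldl_congr_mem
      intro acc pre hpre
      rw [g3 pre, pv_F8 pre hpre, List.nil_append]
      have : (PySem.List.dedup P).filter (pvPB pre)
          = (PySem.List.dedup P).filter (pvCondPre (pvLow pre)) := by
        apply List.filter_congr
        intro a _
        exact (pv_bucket_eq pre hpre a).symm
      rw [this]
    rw [hcg, PySem.List.foldl_append_eq_flatMap]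
    rfl
  rw [hPout]

-- ===== VERDICT (by name: the statement is the Claim_ definition above) =====
theorem identify_priority_files_py_spec : Claim_equal_identify_priority_files_py := by
  intro tree_paths _
  unfold Spec_identify_priority_files_py
  rw [pv_A_eq, pv_B_eq]
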